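-- pv_equiv track=rewrite | github.com/AnchalNigam/Code-Time | CP/new_journey/facebokhackercup/wateringwall/watering_wall.py | distanceCalc
-- ===== SOURCE A (Python) =====
-- module = 1000000007
--
-- def distanceCalc(N, Q, A, B):
--   wholeDist = 0
--   for well in B:
--     wellDist = 0
--     for tree in A:
--       # tempDist = (math.pow(a, 2) + math.pow(b, 2))%module
--       tempDist = ((((well[0]-tree[0])**2)%module) + (((well[1]-tree[1])**2)%module))%module
--       wellDist = (tempDist%module+wellDist%module)%module
--     wholeDist =(wholeDist%module + wellDist%module)%module
--   return wholeDist
-- ===== SOURCE B (Python) =====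
-- module = 1000000007
--
-- def distanceCalc(N, Q, A, B):
--     # expand (wx-tx)^2+(wy-ty)^2 and precompute tree sums: O(len(A)+len(B))
--     n = len(A)
--     sx = sum(t[0] for t in A)
--     sy = sum(t[1] for t in A)
--     sx2 = sum(t[0] ** 2 for t in A)
--     sy2 = sum(t[1] ** 2 for t in A)
--     total = 0
--     for w in B:
--         total += n * (w[0] ** 2 + w[1] ** 2) - 2 * (w[0] * sx + w[1] * sy) + sx2 + sy2
--     return total % module
-- ===== Notes on version B (the rewrite author's own statement) =====
-- stated objective: faster
-- what changed: expands (a-b)^2 and precomputes the trees' coordinate sums and sums of squares once, so each well is handled in O(1) instead of a scan over all trees, with a single mod at the end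
import Mathlib
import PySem

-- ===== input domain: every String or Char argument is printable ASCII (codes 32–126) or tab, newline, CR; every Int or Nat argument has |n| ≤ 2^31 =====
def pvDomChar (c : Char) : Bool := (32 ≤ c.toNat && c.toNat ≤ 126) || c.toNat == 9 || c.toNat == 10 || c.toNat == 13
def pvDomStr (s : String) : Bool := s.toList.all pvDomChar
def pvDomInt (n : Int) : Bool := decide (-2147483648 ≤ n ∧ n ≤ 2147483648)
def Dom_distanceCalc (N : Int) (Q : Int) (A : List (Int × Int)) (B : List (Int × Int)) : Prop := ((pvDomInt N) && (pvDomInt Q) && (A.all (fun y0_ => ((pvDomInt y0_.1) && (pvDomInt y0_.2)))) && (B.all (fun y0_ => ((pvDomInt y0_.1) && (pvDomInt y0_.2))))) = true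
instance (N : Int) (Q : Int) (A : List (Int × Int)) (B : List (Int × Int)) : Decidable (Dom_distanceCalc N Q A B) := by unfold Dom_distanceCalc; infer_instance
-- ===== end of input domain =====

-- B replaces the O(|A|·|B|) double loop by expanding (a-b)^2 and precomputing the
-- trees' coordinate sums and sums of squares once: O(|A|+|B|) with one mod at the end (faster, asymptotic).

-- ===== PORT A =====
-- Python '%' with the positive literal modulus 1000000007 is exactly Lean's Int.emod '%'.
def distanceCalc (N : Int) (Q : Int) (A : List (Int × Int)) (B : List (Int × Int)) : Int :=
  B.foldl (fun wholeDist well =>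
    let wellDist := A.foldl (fun wellDist tree =>
      let tempDist := (((well.1 - tree.1) ^ 2 % 1000000007) + ((well.2 - tree.2) ^ 2 % 1000000007)) % 1000000007
      (tempDist % 1000000007 + wellDist % 1000000007) % 1000000007) 0
    (wholeDist % 1000000007 + wellDist % 1000000007) % 1000000007) 0

-- ===== PORT B =====
def distanceCalc_alt (N : Int) (Q : Int) (A : List (Int × Int)) (B : List (Int × Int)) : Int :=
  let n : Int := A.length
  let sx := (A.map (fun t => t.1)).sum
  let sy := (A.map (fun t => t.2)).sum
  let sx2 := (A.map (fun t => t.1 ^ 2)).sum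
  let sy2 := (A.map (fun t => t.2 ^ 2)).sum
  let total := B.foldl (fun total w =>
    total + (n * (w.1 ^ 2 + w.2 ^ 2) - 2 * (w.1 * sx + w.2 * sy) + sx2 + sy2)) 0
  total % 1000000007

-- ===== PRECONDITION & SPEC =====
def Spec_distanceCalc (N : Int) (Q : Int) (A : List (Int × Int)) (B : List (Int × Int)) (out : Int) : Prop := out = distanceCalc_alt N Q A B
instance (N : Int) (Q : Int) (A : List (Int × Int)) (B : List (Int × Int)) (out : Int) : Decidable (Spec_distanceCalc N Q A B out) := by unfold Spec_distanceCalc; infer_instance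

-- ===== CLAIM (what is proved, stated in full; the proofs are below) =====
def Claim_equal_distanceCalc : Prop := ∀ (N : Int) (Q : Int) (A : List (Int × Int)) (B : List (Int × Int)), Dom_distanceCalc N Q A B → Spec_distanceCalc N Q A B (distanceCalc N Q A B)

-- ===== LEMMAS AND PROOFS =====

-- the modulus as a Nat cast, to move mod-1000000007 goals into ZMod
theorem pvM : ((1000000007 : Int)) = ((1000000007 : Nat) : Int) := by norm_num

-- casting into ZMod 1000000007 erases '% 1000000007'
theorem pvCastMod (x : Int) : ((x % (1000000007 : Int) : Int) : ZMod 1000000007) = (x : ZMod 1000000007) := by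
  rw [pvM]; exact ZMod.intCast_mod x 1000000007

-- squared distance of one well/tree pair
def pvD (w t : Int × Int) : Int := (w.1 - t.1) ^ 2 + (w.2 - t.2) ^ 2

-- A's inner loop, modulo 1000000007, accumulates the sum of squared distances to all trees.
theorem pvInner (w : Int × Int) (A : List (Int × Int)) (c : Int) :
    (A.foldl (fun wellDist tree =>
      let tempDist := (((w.1 - tree.1) ^ 2 % 1000000007) + ((w.2 - tree.2) ^ 2 % 1000000007)) % 1000000007
      (tempDist % 1000000007 + wellDist % 1000000007) % 1000000007) c) % 1000000007
    = ((A.map (pvD w)).sum + c) % 1000000007 := by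
  induction A generalizing c with
  | nil => simp
  | cons t A ih =>
    simp only [List.foldl_cons, List.map_cons, List.sum_cons, ih]
    rw [pvM]
    refine (ZMod.intCast_eq_intCast_iff _ _ _).mp ?_
    rw [← pvM]
    simp only [pvCastMod, Int.cast_add]
    unfold pvD
    push_cast
    ring

-- A's outer loop from a reduced accumulator computes the grand total mod 1000000007.
theorem pvOuter (A B : List (Int × Int)) (c : Int) (hc : c % 1000000007 = c) :
    B.foldl (fun wholeDist well =>
      let wellDist := A.foldl (fun wellDist tree =>
        let tempDist := (((well.1 - tree.1) ^ 2 % 1000000007) + ((well.2 - tree.2) ^ 2 % 1000000007)) % 1000000007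
        (tempDist % 1000000007 + wellDist % 1000000007) % 1000000007) 0
      (wholeDist % 1000000007 + wellDist % 1000000007) % 1000000007) c
    = ((B.map (fun w => (A.map (pvD w)).sum)).sum + c) % 1000000007 := by
  induction B generalizing c with
  | nil => simpa using hc.symm
  | cons w B ih =>
    simp only [List.foldl_cons, List.map_cons, List.sum_cons]
    rw [ih _ (Int.emod_emod _ _), hc, pvInner]
    rw [pvM]
    refine (ZMod.intCast_eq_intCast_iff _ _ _).mp ?_
    rw [← pvM]
    simp only [pvCastMod, Int.cast_add, Int.cast_zero]
    ring

-- B's per-well closed form equals the sum of squared distances over all trees.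
theorem pvClosed (A : List (Int × Int)) (w : Int × Int) :
    (A.length : Int) * (w.1 ^ 2 + w.2 ^ 2)
      - 2 * (w.1 * (A.map (fun t => t.1)).sum + w.2 * (A.map (fun t => t.2)).sum)
      + (A.map (fun t => t.1 ^ 2)).sum + (A.map (fun t => t.2 ^ 2)).sum
    = (A.map (pvD w)).sum := by
  induction A with
  | nil => simp
  | cons t A ih =>
    simp only [List.map_cons, List.sum_cons, List.length_cons]
    rw [← ih]; push_cast; unfold pvD; ring

-- B's accumulation loop is a plain sum.
theorem pvTotal (e : (Int × Int) → Int) (B : List (Int × Int)) (c : Int) :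
    B.foldl (fun total w => total + e w) c = (B.map e).sum + c := by
  induction B generalizing c with
  | nil => simp
  | cons w B ih => simp [ih]; ring

-- ===== VERDICT (by name: the statement is the Claim_ definition above) =====
theorem distanceCalc_spec : Claim_equal_distanceCalc := by
  intro N Q A B _
  show distanceCalc N Q A B = distanceCalc_alt N Q A B
  unfold distanceCalc distanceCalc_alt
  rw [pvOuter A B 0 rfl]
  dsimp only
  rw [pvTotal]
  simp only [pvClosed, add_zero]
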